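-- pv_equiv track=rewrite | github.com/L4rryToru4n/caesar_cipher_w_base64 | Caesar Cipher/main.py | eight_bit_binary
-- ===== SOURCE A (Python) =====
-- def eight_bit_binary(binary_list):
--     """
--     Convert the binary list into an
--     8 bit of binary string list
--     """
--     eight_bit_str = ""
--     letter_list = list()
--     slice_num = 8
--     min_list_index = 6
--     for list_index in range(len(binary_list)):
--         if (list_index + 1) % slice_num == 0 and list_index + 1 > min_list_index:
--             eight_bit_str += binary_list[list_index]
--             letter_list.append(eight_bit_str)
--             eight_bit_str = ""
--         else:
--             eight_bit_str += binary_list[list_index]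
--
--     return letter_list
-- ===== SOURCE B (Python) =====
-- def eight_bit_binary(binary_list):
--     """
--     Convert the binary list into an
--     8 bit of binary string list
--     """
--     # Walk over chunk START positions in strides of 8 and join each whole
--     # 8-element slice at once; a trailing remainder (<8 elements) is dropped,
--     # exactly as in the original.
--     letter_list = []
--     start = 0
--     while start + 8 <= len(binary_list):
--         letter_list.append("".join(binary_list[start:start + 8]))
--         start += 8
--     return letter_list
-- ===== Notes on version B (the rewrite author's own statement) =====
-- stated objective: simpler
-- what changed: B walks over chunk start positions in strides of 8 and joins each whole 8-element slice at once, instead of A's element-by-element scan with a modulo index test and a running string accumulator.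
import Mathlib
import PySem

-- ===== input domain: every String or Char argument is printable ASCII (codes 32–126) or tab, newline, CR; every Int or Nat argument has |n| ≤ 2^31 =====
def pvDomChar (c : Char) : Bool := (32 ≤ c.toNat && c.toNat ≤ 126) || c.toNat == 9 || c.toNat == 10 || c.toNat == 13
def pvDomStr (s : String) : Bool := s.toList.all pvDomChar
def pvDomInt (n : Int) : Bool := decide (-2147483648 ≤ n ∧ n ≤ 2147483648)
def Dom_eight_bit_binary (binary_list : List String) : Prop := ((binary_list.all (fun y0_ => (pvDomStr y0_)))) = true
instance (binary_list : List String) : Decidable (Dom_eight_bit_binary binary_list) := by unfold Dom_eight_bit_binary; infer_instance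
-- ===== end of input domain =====

-- B consumes the list in whole 8-element slices joined in one step instead of A's
-- element-by-element scan with a modulo index test and a running string accumulator.

-- ===== PORT A =====
-- loop body of A: slice_num = 8, min_list_index = 6; state = (eight_bit_str, letter_list)
def ebbStepA (binary_list : List String) (st : String × List String) (list_index : Nat) :
    String × List String :=
  if (list_index + 1) % 8 = 0 ∧ list_index + 1 > 6 then
    ("", st.2 ++ [st.1 ++ binary_list.getD list_index ""])
  else
    (st.1 ++ binary_list.getD list_index "", st.2)

def eight_bit_binary (binary_list : List String) : List String :=
  ((List.range binary_list.length).foldl (ebbStepA binary_list) ("", [])).2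

-- ===== PORT B =====
-- the while loop of B: `start` strides over chunk start positions
def ebbGo (binary_list : List String) (start : Nat) : List String :=
  if start + 8 ≤ binary_list.length then
    PySem.Str.join "" (PySem.List.slice binary_list (some (start : Int)) (some ((start : Int) + 8))) ::
      ebbGo binary_list (start + 8)
  else []
termination_by binary_list.length - start

def eight_bit_binary_alt (binary_list : List String) : List String :=
  ebbGo binary_list 0

-- ===== PRECONDITION & SPEC =====
def Spec_eight_bit_binary (binary_list : List String) (out : List String) : Prop := out = eight_bit_binary_alt binary_list
instance (binary_list : List String) (out : List String) : Decidable (Spec_eight_bit_binary binary_list out) := by unfold Spec_eight_bit_binary; infer_instance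

-- ===== CLAIM (what is proved, stated in full; the proofs are below) =====
def Claim_equal_eight_bit_binary : Prop := ∀ (binary_list : List String), Dom_eight_bit_binary binary_list → Spec_eight_bit_binary binary_list (eight_bit_binary binary_list)

-- ===== LEMMAS AND PROOFS =====

-- A's fold with accumulator `acc` = the fold with accumulator [] prefixed by `acc`
lemma foldA_acc (L : List String) (idx : List Nat) (s : String) (acc : List String) :
    idx.foldl (ebbStepA L) (s, acc) =
      ((idx.foldl (ebbStepA L) (s, [])).1, acc ++ (idx.foldl (ebbStepA L) (s, [])).2) := by
  induction idx generalizing s acc with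
  | nil => simp
  | cons i t ih =>
    simp only [List.foldl_cons, ebbStepA]
    by_cases h : (i + 1) % 8 = 0 ∧ i + 1 > 6
    · rw [if_pos h, if_pos h,
        ih "" (acc ++ [s ++ L.getD i ""]), ih "" ([] ++ [s ++ L.getD i ""])]
      simp
    · rw [if_neg h, if_neg h, ih (s ++ L.getD i "") acc]

-- shifting the index range by 8 = dropping the first 8 list elements
lemma foldA_shift (L : List String) (m : Nat) :
    ∀ (j : Nat) (st : String × List String),
      (List.range' (8 + j) m).foldl (ebbStepA L) st =
        (List.range' j m).foldl (ebbStepA (L.drop 8)) st := by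
  induction m with
  | zero => intro j st; simp
  | succ m ih =>
    intro j st
    simp only [List.range'_succ, List.foldl_cons, ebbStepA]
    have h2 : L.getD (8 + j) "" = (L.drop 8).getD j "" := by
      simp [List.getD, List.getElem?_drop]
    have hcond : ((8 + j + 1) % 8 = 0 ∧ 8 + j + 1 > 6) ↔ ((j + 1) % 8 = 0 ∧ j + 1 > 6) := by
      omega
    by_cases hc : (j + 1) % 8 = 0 ∧ j + 1 > 6
    · rw [if_pos hc, if_pos (hcond.mpr hc), h2]
      exact ih (j + 1) _
    · rw [if_neg hc, if_neg (fun h => hc (hcond.mp h)), h2]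
      exact ih (j + 1) _

-- if no index in the list fires the append condition, the output list is unchanged
lemma foldA_nofire (L : List String) (idx : List Nat)
    (h : ∀ i ∈ idx, ¬((i + 1) % 8 = 0 ∧ i + 1 > 6)) :
    ∀ (s : String) (acc : List String), (idx.foldl (ebbStepA L) (s, acc)).2 = acc := by
  induction idx with
  | nil => intro s acc; simp
  | cons i t ih =>
    intro s acc
    simp only [List.foldl_cons, ebbStepA, if_neg (h i (List.mem_cons_self ..))]
    exact ih (fun j hj => h j (List.mem_cons_of_mem _ hj)) _ _

-- the first 8 iterations of A produce exactly the first joined chunk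
lemma foldA_first8 (a b c d e f g h : String) (rest : List String) :
    (List.range' 0 8).foldl (ebbStepA (a :: b :: c :: d :: e :: f :: g :: h :: rest)) ("", []) =
      ("", [PySem.Str.join "" [a, b, c, d, e, f, g, h]]) := by
  have hr : List.range' 0 8 = [0, 1, 2, 3, 4, 5, 6, 7] := by decide
  rw [hr]
  norm_num [List.foldl_cons, List.foldl_nil, ebbStepA]
  apply String.ext
  simp [PySem.Str.toList_join, PySem.Chars.join_cons_cons, PySem.Chars.join_singleton]

-- B's slice binary_list[start:start+8] as drop/take
lemma slice_chunk (l : List String) (s : Nat) :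
    PySem.List.slice l (some (s : Int)) (some ((s : Int) + 8)) = (l.drop s).take 8 := by
  rw [show ((s : Int) + 8) = ((s + 8 : Nat) : Int) by push_cast; ring,
    PySem.List.slice_natCast]
  congr 1
  omega

-- starting B's stride 8 positions later = starting it on the list without its first 8 elements
lemma ebbGo_drop8 : ∀ (k : Nat) (l : List String) (s : Nat), l.length - s ≤ k →
    ebbGo l (8 + s) = ebbGo (l.drop 8) s := by
  intro k
  induction k with
  | zero =>
    intro l s hk
    conv_lhs => rw [ebbGo]
    conv_rhs => rw [ebbGo]
    rw [if_neg (by omega), if_neg (by simp; omega)]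
  | succ k ih =>
    intro l s hk
    conv_lhs => rw [ebbGo]
    conv_rhs => rw [ebbGo]
    by_cases hc : s + 8 ≤ (l.drop 8).length
    · have hc' : 8 + s + 8 ≤ l.length := by simp at hc; omega
      have hhead : (l.drop (8 + s)).take 8 = ((l.drop 8).drop s).take 8 := by
        rw [List.drop_drop]
      have htail : ebbGo l (8 + s + 8) = ebbGo (l.drop 8) (s + 8) := by
        rw [show 8 + s + 8 = 8 + (s + 8) by omega]
        exact ih l (s + 8) (by omega)
      rw [if_pos hc', if_pos hc, slice_chunk, slice_chunk, hhead, htail]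
    · rw [if_neg (by simp at hc ⊢; omega), if_neg hc]

lemma main_aux : ∀ (n : Nat) (L : List String), L.length ≤ n →
    eight_bit_binary L = eight_bit_binary_alt L := by
  intro n
  induction n with
  | zero =>
    intro L hL
    have : L = [] := List.length_eq_zero_iff.mp (by omega)
    subst this
    rw [eight_bit_binary_alt, ebbGo, if_neg (by simp)]
    simp [eight_bit_binary]
  | succ n ih =>
    intro L hL
    by_cases h8 : 8 ≤ L.length
    · obtain ⟨a, b, c, d, e, f, g, h, rest, rfl⟩ :
          ∃ a b c d e f g h rest, L = a :: b :: c :: d :: e :: f :: g :: h :: rest := by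
        rcases L with _ | ⟨a, _ | ⟨b, _ | ⟨c, _ | ⟨d, _ | ⟨e, _ | ⟨f, _ | ⟨g, _ | ⟨h, rest⟩⟩⟩⟩⟩⟩⟩⟩ <;>
          first | exact ⟨_, _, _, _, _, _, _, _, _, rfl⟩ | simp at h8
      have hlen : (a :: b :: c :: d :: e :: f :: g :: h :: rest).length = 8 + rest.length := by
        simp; omega
      have hsplit : List.range (a :: b :: c :: d :: e :: f :: g :: h :: rest).length =
          List.range' 0 8 ++ List.range' 8 rest.length := by
        rw [hlen, List.range_eq_range', ← List.range'_append]
      rw [eight_bit_binary, hsplit, List.foldl_append, foldA_first8,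
        show (8 : Nat) = 8 + 0 from rfl, foldA_shift, ← List.range_eq_range']
      simp only [List.drop_succ_cons, List.drop_zero]
      rw [foldA_acc]
      have hA : eight_bit_binary rest = eight_bit_binary_alt rest := by
        apply ih; simp at hL; omega
      rw [eight_bit_binary_alt] at hA ⊢
      rw [ebbGo, if_pos (show 0 + 8 ≤ (a :: b :: c :: d :: e :: f :: g :: h :: rest).length by
          simp), slice_chunk,
        show (0 : Nat) + 8 = 8 + 0 by omega, ebbGo_drop8 _ _ 0 (by omega)]
      simp
      exact hA
    · have hA : eight_bit_binary L = [] := by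
        rw [eight_bit_binary]
        exact foldA_nofire L _ (fun i hi => by simp [List.mem_range] at hi; omega) "" []
      rw [hA, eight_bit_binary_alt, ebbGo, if_neg (by omega)]

-- ===== VERDICT (by name: the statement is the Claim_ definition above) =====
theorem eight_bit_binary_spec : Claim_equal_eight_bit_binary := by
  intro L _
  unfold Spec_eight_bit_binary
  exact main_aux L.length L le_rfl
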